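-- pv_equiv track=rewrite | github.com/telandis/pythonexercises | count_seven.py | count_seven_solution
-- ===== SOURCE A (Python) =====
-- def count_seven_solution(number):
--     track = number
--     count = 0
--     while track > 0:
--         if track % 10 == 7:
--             count += 1
--         track //= 10
--     return count
-- ===== SOURCE B (Python) =====
-- def count_seven_solution(number):
--     return str(number).count('7') if number > 0 else 0
-- ===== Notes on version B (the rewrite author's own statement) =====
-- stated objective: idiomatic
-- what changed: Replaces the arithmetic modulo/floor-division digit-extraction loop with the decimal string representation scanned by str.count, keeping A's guard on the sign of the argument.
import Mathlib
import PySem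

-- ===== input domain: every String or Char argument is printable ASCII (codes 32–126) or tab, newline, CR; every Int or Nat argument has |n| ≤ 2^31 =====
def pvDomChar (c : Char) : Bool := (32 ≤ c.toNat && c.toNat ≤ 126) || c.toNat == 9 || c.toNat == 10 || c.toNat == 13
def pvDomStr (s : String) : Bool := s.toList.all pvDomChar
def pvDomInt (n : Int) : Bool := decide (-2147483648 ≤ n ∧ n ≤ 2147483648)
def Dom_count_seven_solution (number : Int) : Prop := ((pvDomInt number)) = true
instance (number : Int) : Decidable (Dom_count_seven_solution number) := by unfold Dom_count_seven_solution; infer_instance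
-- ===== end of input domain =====

-- B replaces A's modulo/floor-division digit loop with str(number).count('7') (guarded for number > 0); same cost, more idiomatic.


-- ===== PORT A =====
-- termination helper for the while loop (cited by the port's decreasing_by)
theorem pvFloordivTen_lt (track : Int) (h : track > 0) :
    (PySem.Int.floordiv track 10).toNat < track.toNat := by
  have h10 : PySem.Int.floordiv track 10 = track / 10 := by
    simp [PySem.Int.floordiv, Int.fdiv_eq_ediv]
  rw [h10]; omega

-- while track > 0: if track % 10 == 7: count += 1; track //= 10
def count_seven_loop (track count : Int) : Int :=
  if h : track > 0 then
    count_seven_loop (PySem.Int.floordiv track 10)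
      (if PySem.Int.mod track 10 = 7 then count + 1 else count)
  else count
termination_by track.toNat
decreasing_by exact pvFloordivTen_lt track h

def count_seven_solution (number : Int) : Int :=
  count_seven_loop number 0

-- ===== PORT B =====
def count_seven_solution_alt (number : Int) : Int :=
  if number > 0 then (PySem.Str.count (PySem.Int.toStr number) "7" : Int) else 0

-- ===== PRECONDITION & SPEC =====
def Spec_count_seven_solution (number : Int) (out : Int) : Prop := out = count_seven_solution_alt number
instance (number : Int) (out : Int) : Decidable (Spec_count_seven_solution number out) := by unfold Spec_count_seven_solution; infer_instance

-- ===== CLAIM (what is proved, stated in full; the proofs are below) =====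
def Claim_equal_count_seven_solution : Prop := ∀ (number : Int), Dom_count_seven_solution number → Spec_count_seven_solution number (count_seven_solution number)

-- ===== LEMMAS AND PROOFS =====

-- number of 7-digits of a natural number (proof-side reference function)
def cnt7 (n : Nat) : Nat :=
  if n = 0 then 0 else (if n % 10 = 7 then 1 else 0) + cnt7 (n / 10)
decreasing_by exact Nat.div_lt_self (by omega) (by omega)

theorem cnt7_zero : cnt7 0 = 0 := by rw [cnt7]; simp

theorem cnt7_pos (n : Nat) (h : n ≠ 0) :
    cnt7 n = (if n % 10 = 7 then 1 else 0) + cnt7 (n / 10) := by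
  conv_lhs => rw [cnt7]
  rw [if_neg h]

theorem floordiv_ten_natCast (n : Nat) :
    PySem.Int.floordiv (n : Int) 10 = ((n / 10 : Nat) : Int) := by
  simp [PySem.Int.floordiv, Int.fdiv_eq_ediv]

theorem mod_ten_natCast (n : Nat) :
    PySem.Int.mod (n : Int) 10 = ((n % 10 : Nat) : Int) := by
  simp [PySem.Int.mod, Int.fmod_eq_emod]

-- the A-side loop computes cnt7
theorem count_seven_loop_eq (n : Nat) : ∀ c : Int,
    count_seven_loop (n : Int) c = c + (cnt7 n : Int) := by
  induction n using Nat.strong_induction_on with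
  | _ n ih =>
    intro c
    by_cases h0 : n = 0
    · subst h0
      rw [count_seven_loop, cnt7_zero]
      simp
    · have hpos : ((n : Int)) > 0 := by omega
      rw [count_seven_loop]
      simp only [hpos, dif_pos, floordiv_ten_natCast, mod_ten_natCast]
      rw [ih (n / 10) (Nat.div_lt_self (by omega) (by omega))]
      rw [cnt7_pos n h0]
      by_cases h7 : n % 10 = 7
      · have hc : ((n % 10 : Nat) : Int) = 7 := by omega
        rw [if_pos hc, if_pos h7]
        push_cast
        ring
      · have hc : ¬ (((n % 10 : Nat) : Int) = 7) := by omega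
        rw [if_neg hc, if_neg h7]
        push_cast
        ring

theorem digitChar_eq_seven (d : Nat) (h : d < 10) : (Nat.digitChar d = '7') ↔ d = 7 := by
  interval_cases d <;> simp [Nat.digitChar]

-- counting '7' in Nat.toDigitsCore output
theorem toDigitsCore_count7 : ∀ (fuel n : Nat) (acc : List Char), n < fuel →
    (Nat.toDigitsCore 10 fuel n acc).count '7'
      = (if n % 10 = 7 then 1 else 0) + cnt7 (n / 10) + acc.count '7' := by
  intro fuel
  induction fuel with
  | zero => intro n acc h; omega
  | succ f ih =>
    intro n acc h
    have hlt : n % 10 < 10 := Nat.mod_lt _ (by omega)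
    rw [Nat.toDigitsCore]
    by_cases hz : n / 10 = 0
    · rw [if_pos hz, hz, cnt7_zero, List.count_cons]
      by_cases hd : n % 10 = 7
      · have hc : ((n % 10).digitChar == '7') = true := by
          simp [(digitChar_eq_seven _ hlt).mpr hd]
        rw [if_pos hd, hc]
        simp; omega
      · have hc : ((n % 10).digitChar == '7') = false := by
          simp; exact fun h => hd ((digitChar_eq_seven _ hlt).mp h)
        rw [if_neg hd, hc]
        simp
    · rw [if_neg hz]
      rw [ih (n / 10) _ (by omega)]
      rw [cnt7_pos (n / 10) hz, List.count_cons]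
      by_cases hd : n % 10 = 7
      · have hc : ((n % 10).digitChar == '7') = true := by
          simp [(digitChar_eq_seven _ hlt).mpr hd]
        rw [if_pos hd, hc]
        simp; omega
      · have hc : ((n % 10).digitChar == '7') = false := by
          simp; exact fun h => hd ((digitChar_eq_seven _ hlt).mp h)
        rw [if_neg hd, hc]
        simp

-- Chars.count with the single-character pattern ['7'] is List.count
theorem count_go_single : ∀ (fuel : Nat) (s : List Char) (acc : Nat), s.length ≤ fuel →
    PySem.Chars.count.go ['7'] fuel s acc = acc + s.count '7' := by
  intro fuel
  induction fuel with
  | zero =>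
    intro s acc h
    have : s = [] := by cases s <;> simp_all
    subst this; rw [PySem.Chars.count.go]; simp
  | succ f ih =>
    intro s acc h
    cases s with
    | nil =>
      rw [PySem.Chars.count.go]
      simp
      omega
    | cons hd tl =>
      rw [PySem.Chars.count.go]
      simp only [List.isPrefixOf, List.count_cons]
      by_cases h7 : hd = '7'
      · have : ('7' == hd) = true := by simp [h7]
        simp only [this, Bool.true_and, if_pos]
        rw [List.length_singleton, List.drop_one, List.tail_cons,
          ih tl (acc + 1) (by simp at h ⊢; omega)]
        simp [h7]
        omega
      · have : ('7' == hd) = false := by simp; exact fun hc => h7 hc.symm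
        simp only [this, Bool.false_and, Bool.false_eq_true, if_neg, not_false_iff]
        rw [ih tl acc (by simp at h ⊢; omega)]
        simp [h7]

theorem chars_count_single (s : List Char) :
    PySem.Chars.count s ['7'] = s.count '7' := by
  rw [PySem.Chars.count]
  simp only [List.isEmpty_cons, Bool.false_eq_true, if_neg, not_false_iff]
  simpa using count_go_single s.length s 0 (le_refl _)

theorem str_count_toStr (n : Nat) (hn : 0 < n) :
    PySem.Str.count (PySem.Int.toStr (n : Int)) "7" = cnt7 n := by
  rw [PySem.Str.count]
  have htl : (PySem.Int.toStr (n : Int)).toList = PySem.Int.toChars (n : Int) :=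
    PySem.Int.toList_toStr _
  rw [htl]
  have hneg : ¬ ((n : Int) < 0) := by omega
  rw [PySem.Int.toChars]
  simp only [hneg, if_neg, not_false_iff, Int.toNat_natCast]
  have h7 : "7".toList = ['7'] := by decide
  rw [h7, chars_count_single]
  rw [Nat.toDigits, toDigitsCore_count7 (n + 1) n [] (by omega)]
  conv_rhs => rw [cnt7_pos n (by omega)]
  simp

-- ===== VERDICT (by name: the statement is the Claim_ definition above) =====
theorem count_seven_solution_spec : Claim_equal_count_seven_solution := by
  intro number _
  unfold Spec_count_seven_solution count_seven_solution count_seven_solution_alt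
  by_cases hpos : number > 0
  · have hn : number = ((number.toNat : Nat) : Int) := by omega
    rw [if_pos hpos, hn, count_seven_loop_eq number.toNat 0,
      str_count_toStr number.toNat (by omega)]
    ring
  · rw [count_seven_loop, if_neg hpos]
    simp [hpos]
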